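-- pv_equiv track=rewrite | github.com/Innovotive/019-10-IFC-ATP-APP | UI/tests/CAN/can_utils.py | extract_idpins_from_payload
-- ===== SOURCE A (Python) =====
-- ID_READ_REPORT_BASE = 0x40  # 0x40..0x47 encodes idconfig 0..7
--
-- def extract_idpins_from_payload(data):
--     """
--     IMPORTANT FIX:
--     -------------
--     Old logic returned the FIRST byte that looks like 0..7 or 0x40..0x47.
--     That can be wrong because payloads often contain 0x00 padding, and 0x00
--     is a valid raw idconfig, so we could accidentally return 0 even when the
--     real answer is elsewhere.
--
--     New logic:
--     - Prefer "reported" bytes 0x40..0x47 first (unambiguous)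
--     - Only if none exist, fall back to raw 0x00..0x07
--     """
--     # 1) Prefer reported encoding first (0x40..0x47)
--     for b in data:
--         b = int(b)
--         if ID_READ_REPORT_BASE <= b <= ID_READ_REPORT_BASE + 7:
--             return b - ID_READ_REPORT_BASE
--
--     # 2) Fallback to raw only if no reported byte found
--     for b in data:
--         b = int(b)
--         if 0x00 <= b <= 0x07:
--             return b
--
--     return None
-- ===== SOURCE B (Python) =====
-- ID_READ_REPORT_BASE = 0x40
--
-- def extract_idpins_from_payload(data):
--     raw = None
--     for b in data:
--         b = int(b)
--         if ID_READ_REPORT_BASE <= b <= ID_READ_REPORT_BASE + 7: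
--             return b - ID_READ_REPORT_BASE
--         if raw is None and 0x00 <= b <= 0x07:
--             raw = b
--     return raw
-- ===== Notes on version B (the rewrite author's own statement) =====
-- stated objective: simpler
-- what changed: Replaces A's two sequential scans with a single pass that returns a reported byte (0x40..0x47) immediately and records the first raw byte (0..7) as a fallback returned after the loop.
import Mathlib
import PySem

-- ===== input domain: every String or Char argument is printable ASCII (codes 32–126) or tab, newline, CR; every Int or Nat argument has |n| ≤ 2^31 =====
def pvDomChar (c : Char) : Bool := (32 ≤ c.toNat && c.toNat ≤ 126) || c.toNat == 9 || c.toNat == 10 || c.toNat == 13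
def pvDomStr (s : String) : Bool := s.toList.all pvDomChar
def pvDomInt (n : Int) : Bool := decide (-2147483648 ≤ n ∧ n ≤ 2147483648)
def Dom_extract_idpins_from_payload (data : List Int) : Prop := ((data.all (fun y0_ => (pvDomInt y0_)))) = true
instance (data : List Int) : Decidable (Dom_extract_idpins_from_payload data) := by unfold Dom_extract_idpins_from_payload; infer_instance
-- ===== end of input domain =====

-- B replaces A's two sequential scans with one pass carrying a raw-candidate accumulator (objective: simpler).

-- ===== PORT A =====
-- first loop: return the first reported byte (0x40..0x47) minus the base
def pvA_loop1 (data : List Int) : Option Int :=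
  match data with
  | [] => none
  | b :: rest => if 0x40 ≤ b ∧ b ≤ 0x40 + 7 then some (b - 0x40) else pvA_loop1 rest

-- second loop: return the first raw byte (0x00..0x07)
def pvA_loop2 (data : List Int) : Option Int :=
  match data with
  | [] => none
  | b :: rest => if 0x00 ≤ b ∧ b ≤ 0x07 then some b else pvA_loop2 rest

def extract_idpins_from_payload (data : List Int) : Option Int :=
  match pvA_loop1 data with
  | some v => some v
  | none =>
    match pvA_loop2 data with
    | some v => some v
    | none => none

-- ===== PORT B =====
-- single pass: return a reported byte at once, record the first raw byte, return it after the loop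
def pvB_loop (data : List Int) (raw : Option Int) : Option Int :=
  match data with
  | [] => raw
  | b :: rest =>
    if 0x40 ≤ b ∧ b ≤ 0x40 + 7 then some (b - 0x40)
    else pvB_loop rest (if raw = none ∧ 0x00 ≤ b ∧ b ≤ 0x07 then some b else raw)

def extract_idpins_from_payload_alt (data : List Int) : Option Int :=
  pvB_loop data none

-- ===== PRECONDITION & SPEC =====
def Spec_extract_idpins_from_payload (data : List Int) (out : Option Int) : Prop := out = extract_idpins_from_payload_alt data
instance (data : List Int) (out : Option Int) : Decidable (Spec_extract_idpins_from_payload data out) := by unfold Spec_extract_idpins_from_payload; infer_instance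

-- ===== CLAIM (what is proved, stated in full; the proofs are below) =====
def Claim_equal_extract_idpins_from_payload : Prop := ∀ (data : List Int), Dom_extract_idpins_from_payload data → Spec_extract_idpins_from_payload data (extract_idpins_from_payload data)

-- ===== LEMMAS AND PROOFS =====

-- Invariant of B's loop: reported byte wins; otherwise the recorded candidate, then the first raw byte of the rest.
theorem pvB_loop_char (data : List Int) (raw : Option Int) :
    pvB_loop data raw =
      match pvA_loop1 data with
      | some v => some v
      | none => match raw with
                | some r => some r
                | none => pvA_loop2 data := by
  induction data generalizing raw with
  | nil => cases raw <;> simp [pvB_loop, pvA_loop1, pvA_loop2]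
  | cons b rest ih =>
    simp only [pvB_loop, pvA_loop1, pvA_loop2]
    by_cases h1 : 0x40 ≤ b ∧ b ≤ 0x40 + 7
    · simp [h1.1, show b ≤ 71 from by omega]
    · rw [if_neg h1, if_neg h1, ih]
      by_cases h2 : 0x00 ≤ b ∧ b ≤ 0x07
      · cases raw <;> simp [h2]
      · cases raw <;> simp [h2]

-- ===== VERDICT (by name: the statement is the Claim_ definition above) =====
theorem extract_idpins_from_payload_spec : Claim_equal_extract_idpins_from_payload := by
  intro data _
  unfold Spec_extract_idpins_from_payload extract_idpins_from_payload extract_idpins_from_payload_alt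
  rw [pvB_loop_char]
  cases pvA_loop1 data <;> cases h2 : pvA_loop2 data <;> simp
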